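-- pv_equiv track=rewrite | github.com/syed-maisam/CCPS109 | labs109.py | riffle
-- ===== SOURCE A (Python) =====
-- def riffle(items, out=True):
--     n = len(items)
--     half = n // 2
--
--     if n == 0:
--         return []
--
--     first_half = items[:half]
--     second_half = items[half:]
--     result = []
--
--     if out:
--         first, second = first_half, second_half
--     else:
--         first, second = second_half, first_half
--
--     for i in range(half):
--         result.append(first[i])
--         result.append(second[i])
--
--     return result
-- ===== SOURCE B (Python) =====
-- def riffle(items, out=True):
--     half = len(items) // 2
--     if out:
--         first, second = items[:half], items[half:]
--     else:
--         first, second = items[half:], items[:half]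
--     result = [None] * (2 * half)
--     result[0::2] = first[:half]
--     result[1::2] = second[:half]
--     return result
-- ===== Notes on version B (the rewrite author's own statement) =====
-- stated objective: alternative
-- what changed: Instead of one loop appending pairs, B preallocates a 2*half result and places each half in a separate pass via strided slice assignment to the even and odd positions (truncating the longer half to length half).
import Mathlib
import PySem

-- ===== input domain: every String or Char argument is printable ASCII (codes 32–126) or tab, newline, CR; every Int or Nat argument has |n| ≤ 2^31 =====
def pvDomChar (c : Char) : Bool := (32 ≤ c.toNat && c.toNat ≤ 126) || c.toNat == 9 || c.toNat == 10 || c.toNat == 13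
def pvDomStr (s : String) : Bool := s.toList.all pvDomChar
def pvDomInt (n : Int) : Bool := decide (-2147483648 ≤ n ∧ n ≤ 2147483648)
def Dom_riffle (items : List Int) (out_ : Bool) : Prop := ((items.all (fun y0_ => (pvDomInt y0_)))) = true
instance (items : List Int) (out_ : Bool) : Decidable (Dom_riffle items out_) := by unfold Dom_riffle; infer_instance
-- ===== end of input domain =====

-- B replaces A's pair-appending loop by preallocating the result and filling even/odd positions in two strided-assignment passes (alternative decomposition; same cost).


-- ===== PORT A =====
-- literal port of A: early return on n == 0, slices, tuple select, index loop with two appends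
def riffle (items : List Int) (out_ : Bool) : List Int :=
  let n : Int := items.length
  let half : Int := PySem.Int.floordiv n 2
  if n = 0 then []
  else
    let first_half := PySem.List.slice items none (some half)
    let second_half := PySem.List.slice items (some half) none
    let fs := if out_ then (first_half, second_half) else (second_half, first_half)
    -- loop indices 0 ≤ i < half are always in range, so the getD default 0 is never used
    (PySem.List.pyRange 0 half 1).foldl
      (fun result i => result ++ [PySem.List.pyGetD fs.1 i 0, PySem.List.pyGetD fs.2 i 0]) []

-- ===== PORT B =====
-- port of 'result[start::2] = vals': overwrite positions start, start+2, … with vals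
def setStride2 : List Int → Nat → List Int → List Int
  | res, _, [] => res
  | res, i, v :: vs => setStride2 (res.set i v) (i + 2) vs

-- port of B: preallocate 2*half slots (placeholder 0, every slot is overwritten),
-- then fill even positions from first[:half] and odd positions from second[:half]
def riffle_alt (items : List Int) (out_ : Bool) : List Int :=
  let half : Int := PySem.Int.floordiv (items.length : Int) 2
  let fs := if out_ then
      (PySem.List.slice items none (some half), PySem.List.slice items (some half) none)
    else
      (PySem.List.slice items (some half) none, PySem.List.slice items none (some half))
  let result := List.replicate (2 * half).toNat 0
  let result := setStride2 result 0 (PySem.List.slice fs.1 none (some half))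
  setStride2 result 1 (PySem.List.slice fs.2 none (some half))

-- ===== PRECONDITION & SPEC =====
def Spec_riffle (items : List Int) (out_ : Bool) (out : List Int) : Prop := out = riffle_alt items out_
instance (items : List Int) (out_ : Bool) (out : List Int) : Decidable (Spec_riffle items out_ out) := by unfold Spec_riffle; infer_instance

-- ===== CLAIM (what is proved, stated in full; the proofs are below) =====
def Claim_equal_riffle : Prop := ∀ (items : List Int) (out_ : Bool), Dom_riffle items out_ → Spec_riffle items out_ (riffle items out_)

-- ===== LEMMAS AND PROOFS =====
-- range-indexed interleaving equals zip interleaving when the range bound is the shorter length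
lemma zipFlat : ∀ (a b : List Int),
    (List.range (min a.length b.length)).flatMap (fun k => [a.getD k 0, b.getD k 0])
      = (a.zip b).flatMap (fun p => [p.1, p.2]) := by
  intro a
  induction a with
  | nil => intro b; simp
  | cons x xs ih =>
    intro b
    cases b with
    | nil => simp
    | cons y ys =>
      have hmin : min (x :: xs).length (y :: ys).length
          = min xs.length ys.length + 1 := by simp
      rw [hmin, List.range_succ_eq_map, List.flatMap_cons, List.flatMap_map]
      simpa using congrArg (fun t => [x, y] ++ t) (ih ys)

-- A's append loop over range(h) is the zip interleave of a and b when h is the shorter length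
lemma loopEq (a b : List Int) (h : Nat) (hh : h = min a.length b.length) :
    (PySem.List.pyRange 0 (h : Int) 1).foldl
      (fun result i => result ++ [PySem.List.pyGetD a i 0, PySem.List.pyGetD b i 0]) []
      = (a.zip b).flatMap (fun p => [p.1, p.2]) := by
  rw [PySem.List.foldl_append_eq_flatMap, PySem.List.pyRange_one, List.flatMap_map]
  simp only [Int.sub_zero, Int.toNat_natCast, List.nil_append, zero_add,
    PySem.List.pyGetD_natCast]
  rw [hh, zipFlat]

-- writing with stride 2 from position i+2 leaves the first two cells alone
lemma setStride2_shift : ∀ (vs : List Int) (u v : Int) (r : List Int) (i : Nat),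
    setStride2 (u :: v :: r) (i + 2) vs = u :: v :: setStride2 r i vs := by
  intro vs
  induction vs with
  | nil => intro u v r i; rfl
  | cons w ws ih =>
    intro u v r i
    show setStride2 ((u :: v :: r).set (i + 2) w) (i + 2 + 2) ws = _
    have hset : (u :: v :: r).set (i + 2) w = u :: v :: r.set i w := by
      simp [List.set]
    rw [hset, ih]
    rfl

-- the two strided passes over a fresh 2*h block produce the zip interleave
lemma stridesEq : ∀ (a b : List Int) (h : Nat), a.length = h → b.length = h →
    setStride2 (setStride2 (List.replicate (2 * h) 0) 0 a) 1 b
      = (a.zip b).flatMap (fun p => [p.1, p.2]) := by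
  intro a
  induction a with
  | nil =>
    intro b h ha hb
    simp only [List.length_nil] at ha
    have : b = [] := List.eq_nil_of_length_eq_zero (by omega)
    subst this; subst ha; rfl
  | cons x xs ih =>
    intro b h ha hb
    cases b with
    | nil => exfalso; simp at ha hb; omega
    | cons y ys =>
      obtain ⟨k, rfl⟩ : ∃ k, h = k + 1 := ⟨xs.length, by simpa using ha.symm⟩
      have hrep : List.replicate (2 * (k + 1)) (0 : Int)
          = 0 :: 0 :: List.replicate (2 * k) 0 := by
        have : 2 * (k + 1) = (2 * k) + 1 + 1 := by omega
        rw [this]; rfl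
      have hxs : xs.length = k := by simpa using ha
      have hys : ys.length = k := by simpa using hb
      rw [hrep]
      show setStride2 (setStride2 ((0 :: 0 :: List.replicate (2*k) 0).set 0 x) 2 xs) 1 (y :: ys) = _
      have h2 : (2 : Nat) = 0 + 2 := rfl
      rw [show ((0 :: 0 :: List.replicate (2*k) (0:Int)).set 0 x) = x :: 0 :: List.replicate (2*k) 0 from rfl,
          h2, setStride2_shift]
      show setStride2 ((x :: 0 :: setStride2 (List.replicate (2*k) 0) 0 xs).set 1 y) 3 ys = _
      rw [show ((x :: 0 :: setStride2 (List.replicate (2*k) (0:Int)) 0 xs).set 1 y)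
            = x :: y :: setStride2 (List.replicate (2*k) 0) 0 xs from rfl,
          show (3 : Nat) = 1 + 2 from rfl, setStride2_shift, ih ys k hxs hys]
      rfl

-- zipping truncated lists is truncating the zip
lemma zipTrunc : ∀ (a b : List Int) (n : Nat), (a.take n).zip (b.take n) = (a.zip b).take n := by
  intro a
  induction a with
  | nil => intro b n; simp
  | cons x xs ih =>
    intro b n
    cases b with
    | nil => simp
    | cons y ys =>
      cases n with
      | zero => simp
      | succ m => simp [ih ys m]

-- ===== VERDICT (by name: the statement is the Claim_ definition above) =====
theorem riffle_spec : Claim_equal_riffle := by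
  intro items out_ _
  show riffle items out_ = riffle_alt items out_
  unfold riffle riffle_alt
  have hfd : PySem.Int.floordiv (items.length : Int) 2 = ((items.length / 2 : Nat) : Int) := by
    exact_mod_cast PySem.Int.floordiv_natCast items.length 2
  by_cases h0 : (items.length : Int) = 0
  · have : items = [] := by
      cases items with
      | nil => rfl
      | cons x xs => exfalso; simp at h0; omega
    subst this; cases out_ <;> rfl
  · simp only [h0, if_false, hfd]
    rw [PySem.List.slice_to_natCast, PySem.List.slice_from_natCast]
    have hle : items.length / 2 ≤ items.length := Nat.div_le_self _ _
    set h := items.length / 2 with hh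
    have hlen1 : (items.take h).length = h := by simp; omega
    have hlen2 : h ≤ (items.drop h).length := by simp; omega
    cases out_ <;>
      simp only [if_true, if_false, Bool.false_eq_true] <;>
      rw [PySem.List.slice_to_natCast, PySem.List.slice_to_natCast,
          show ((2 : Int) * (h : Int)).toNat = 2 * h from by omega]
    · -- out = False: first = drop, second = take
      rw [loopEq (items.drop h) (items.take h) h (by simp only [List.length_take, List.length_drop]; omega),
          stridesEq _ _ h (by simp only [List.length_take, List.length_drop]; omega) (by simp only [List.length_take, List.length_drop]; omega), zipTrunc]
      have : ((items.drop h).zip (items.take h)).length ≤ h := by simp only [List.length_zip, List.length_take, List.length_drop]; omega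
      rw [List.take_of_length_le this]
    · -- out = True: first = take, second = drop
      rw [loopEq (items.take h) (items.drop h) h (by simp only [List.length_take, List.length_drop]; omega),
          stridesEq _ _ h (by simp only [List.length_take, List.length_drop]; omega) (by simp only [List.length_take, List.length_drop]; omega), zipTrunc]
      have : ((items.take h).zip (items.drop h)).length ≤ h := by simp only [List.length_zip, List.length_take, List.length_drop]; omega
      rw [List.take_of_length_le this]
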